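-- pv_equiv track=rewrite | github.com/akon1220/ML_IS | experiments/cdisn_training_taskwise_exp11122021_b10TT.py | build_list_of_split_combos
-- ===== SOURCE A (Python) =====
-- def build_list_of_split_combos(available_split_sets_by_task, split_combos):
--     if len(available_split_sets_by_task) == 0:
--         return split_combos
--     else:
--         new_split = available_split_sets_by_task[0]
--         if len(split_combos) == 0:
--             for fold in new_split:
--                 split_combos.append([fold])
--         else:
--             new_split_combos = []
--             for i, combo in enumerate(split_combos):
--                 for fold in new_split:
--                     new_split_combos.append(combo + [fold])
--             split_combos = new_split_combos
--         return build_list_of_split_combos(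
--             available_split_sets_by_task[1:], split_combos
--         )
-- ===== SOURCE B (Python) =====
-- def build_list_of_split_combos(available_split_sets_by_task, split_combos):
--     for new_split in available_split_sets_by_task:
--         if len(split_combos) == 0:
--             for fold in new_split:
--                 split_combos.append([fold])
--         else:
--             new_split_combos = []
--             for combo in split_combos:
--                 for fold in new_split:
--                     new_split_combos.append(combo + [fold])
--             split_combos = new_split_combos
--     return split_combos
-- ===== Notes on version B (the rewrite author's own statement) =====
-- stated objective: simpler
-- what changed: Replaces A's tail recursion on a sliced copy of the task list with a single iterative for-loop over the task list, keeping the same per-level combo-major/fold-minor expansion (including the in-place append when split_combos is empty).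
import Mathlib
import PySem

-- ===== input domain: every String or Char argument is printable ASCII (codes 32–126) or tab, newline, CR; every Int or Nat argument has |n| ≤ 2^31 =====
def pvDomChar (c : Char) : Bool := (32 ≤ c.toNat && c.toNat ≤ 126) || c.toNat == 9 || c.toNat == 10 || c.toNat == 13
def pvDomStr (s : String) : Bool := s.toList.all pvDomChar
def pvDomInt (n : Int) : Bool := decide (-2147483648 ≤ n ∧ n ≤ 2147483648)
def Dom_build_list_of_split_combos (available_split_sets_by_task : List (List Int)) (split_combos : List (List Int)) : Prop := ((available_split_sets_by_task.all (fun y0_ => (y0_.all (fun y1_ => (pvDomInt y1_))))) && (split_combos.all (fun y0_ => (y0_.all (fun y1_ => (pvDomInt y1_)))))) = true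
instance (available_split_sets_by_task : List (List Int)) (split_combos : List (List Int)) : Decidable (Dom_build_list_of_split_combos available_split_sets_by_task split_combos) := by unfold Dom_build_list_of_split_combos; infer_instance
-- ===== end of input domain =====

-- B replaces A's tail recursion over a sliced copy of the list with one iterative
-- for-loop (a fold) over the task list; return values agree (objective: simpler).
-- Note: both A and B mutate the caller's split_combos list in place when it is
-- empty at the first level; the equivalence proved here is about the return value.

-- ===== PORT A =====
-- 'for fold in new_split: split_combos.append([fold])'
def pvA_appendSingles (new_split : List Int) (split_combos : List (List Int)) : List (List Int) :=
  match new_split with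
  | [] => split_combos
  | f :: fs => pvA_appendSingles fs (split_combos ++ [[f]])

-- inner 'for fold in new_split: new_split_combos.append(combo + [fold])'
def pvA_appendCombos (new_split : List Int) (combo : List Int) (acc : List (List Int)) : List (List Int) :=
  match new_split with
  | [] => acc
  | f :: fs => pvA_appendCombos fs combo (acc ++ [combo ++ [f]])

-- outer 'for i, combo in enumerate(split_combos): …'
def pvA_buildNew (split_combos : List (List Int)) (new_split : List Int) (acc : List (List Int)) : List (List Int) :=
  match split_combos with
  | [] => acc
  | c :: cs => pvA_buildNew cs new_split (pvA_appendCombos new_split c acc)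

def build_list_of_split_combos (available_split_sets_by_task : List (List Int)) (split_combos : List (List Int)) : List (List Int) :=
  match available_split_sets_by_task with
  | [] => split_combos
  | new_split :: rest =>
    let split_combos' :=
      if split_combos.length = 0 then pvA_appendSingles new_split split_combos
      else pvA_buildNew split_combos new_split []
    build_list_of_split_combos rest split_combos'

-- ===== PORT B =====
def build_list_of_split_combos_alt (available_split_sets_by_task : List (List Int)) (split_combos : List (List Int)) : List (List Int) :=
  available_split_sets_by_task.foldl
    (fun sc new_split =>
      if sc.length = 0 then
        new_split.foldl (fun s f => s ++ [[f]]) sc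
      else
        sc.foldl (fun acc combo => new_split.foldl (fun acc2 f => acc2 ++ [combo ++ [f]]) acc) [])
    split_combos

-- ===== PRECONDITION & SPEC =====
def Spec_build_list_of_split_combos (available_split_sets_by_task : List (List Int)) (split_combos : List (List Int)) (out : List (List Int)) : Prop := out = build_list_of_split_combos_alt available_split_sets_by_task split_combos
instance (available_split_sets_by_task : List (List Int)) (split_combos : List (List Int)) (out : List (List Int)) : Decidable (Spec_build_list_of_split_combos available_split_sets_by_task split_combos out) := by unfold Spec_build_list_of_split_combos; infer_instance

-- ===== CLAIM (what is proved, stated in full; the proofs are below) =====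
def Claim_equal_build_list_of_split_combos : Prop := ∀ (available_split_sets_by_task : List (List Int)) (split_combos : List (List Int)), Dom_build_list_of_split_combos available_split_sets_by_task split_combos → Spec_build_list_of_split_combos available_split_sets_by_task split_combos (build_list_of_split_combos available_split_sets_by_task split_combos)

-- ===== LEMMAS AND PROOFS =====
theorem pvA_appendSingles_eq_foldl (ns : List Int) (sc : List (List Int)) :
    pvA_appendSingles ns sc = ns.foldl (fun s f => s ++ [[f]]) sc := by
  induction ns generalizing sc with
  | nil => rfl
  | cons f fs ih => simp [pvA_appendSingles, List.foldl, ih]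

theorem pvA_appendCombos_eq_foldl (ns : List Int) (c : List Int) (acc : List (List Int)) :
    pvA_appendCombos ns c acc = ns.foldl (fun acc2 f => acc2 ++ [c ++ [f]]) acc := by
  induction ns generalizing acc with
  | nil => rfl
  | cons f fs ih => simp [pvA_appendCombos, List.foldl, ih]

theorem pvA_buildNew_eq_foldl (sc : List (List Int)) (ns : List Int) (acc : List (List Int)) :
    pvA_buildNew sc ns acc =
      sc.foldl (fun acc combo => ns.foldl (fun acc2 f => acc2 ++ [combo ++ [f]]) acc) acc := by
  induction sc generalizing acc with
  | nil => rfl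
  | cons c cs ih => simp [pvA_buildNew, List.foldl, ih, pvA_appendCombos_eq_foldl]

theorem pvAB_eq (a : List (List Int)) (sc : List (List Int)) :
    build_list_of_split_combos a sc = build_list_of_split_combos_alt a sc := by
  induction a generalizing sc with
  | nil => rfl
  | cons ns rest ih =>
    simp only [build_list_of_split_combos, build_list_of_split_combos_alt, List.foldl]
    rw [ih]
    unfold build_list_of_split_combos_alt
    split_ifs with h
    · rw [pvA_appendSingles_eq_foldl]
    · rw [pvA_buildNew_eq_foldl]

-- ===== VERDICT (by name: the statement is the Claim_ definition above) =====
theorem build_list_of_split_combos_spec : Claim_equal_build_list_of_split_combos := by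
  intro a sc _
  unfold Spec_build_list_of_split_combos
  exact pvAB_eq a sc
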